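-- pv_equiv track=rewrite | github.com/haolunc/ARC-RL | reference_solutions/solutions/87ab05b8.py | transform
-- ===== SOURCE A (Python) =====
-- def transform(grid):
--
--     pos = None
--     for i, row in enumerate(grid):
--         for j, val in enumerate(row):
--             if val == 2:
--                 pos = (i, j)
--                 break
--         if pos:
--             break
--
--     if pos is None:
--         return [[6 for _ in row] for row in grid]
--
--     start_row = (pos[0] // 2) * 2
--     start_col = (pos[1] // 2) * 2
--
--     out = [[6 for _ in row] for row in grid]
--
--     rows = len(grid)
--     cols = len(grid[0])
--     for i in range(start_row, min(start_row + 2, rows)):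
--         for j in range(start_col, min(start_col + 2, cols)):
--             out[i][j] = 2
--
--     return out
-- ===== SOURCE B (Python) =====
-- def transform(grid):
--     r = next((i for i, row in enumerate(grid) if 2 in row), None)
--     if r is None:
--         return [[6] * len(row) for row in grid]
--     c = grid[r].index(2)
--     sr, sc = r - r % 2, c - c % 2
--     hc = min(sc + 2, len(grid[0]))
--     out = [[6] * len(row) for row in grid[:sr]]
--     out += [[6] * sc + [2] * (hc - sc) + [6] * (len(row) - hc) for row in grid[sr:sr + 2]]
--     out += [[6] * len(row) for row in grid[sr + 2:]]
--     return out
-- ===== Notes on version B (the rewrite author's own statement) =====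
-- stated objective: alternative
-- what changed: Locates the target row by per-row membership ('2 in row') plus .index instead of A's nested cell scan with break flags, and assembles the output by concatenating three row segments (rows before the block, two marked rows built as [6]*sc+[2]*k+[6]*rest, rows after) instead of A's build-all-6s-then-mutate-the-block two-phase writes.
-- outside the precondition, e.g. on transform([[6], [6, 6, 2]]): A returns [[6], [6, 6, 6]], B returns [[6, 6], [6, 6, 6, 6]]
import Mathlib
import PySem

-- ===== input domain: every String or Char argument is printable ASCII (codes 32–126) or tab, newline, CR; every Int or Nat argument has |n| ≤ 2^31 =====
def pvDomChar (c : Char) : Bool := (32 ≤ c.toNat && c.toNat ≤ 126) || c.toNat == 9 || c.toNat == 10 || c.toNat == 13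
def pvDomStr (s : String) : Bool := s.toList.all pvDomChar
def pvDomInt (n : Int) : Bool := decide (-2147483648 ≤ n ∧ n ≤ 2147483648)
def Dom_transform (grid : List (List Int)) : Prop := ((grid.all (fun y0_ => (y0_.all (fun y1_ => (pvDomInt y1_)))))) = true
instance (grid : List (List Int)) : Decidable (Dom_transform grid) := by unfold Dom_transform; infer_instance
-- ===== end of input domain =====

-- B finds the marked row by per-row membership + .index and assembles the output as three
-- concatenated row segments instead of A's fill-all-6s-then-mutate block writes; objective:
-- alternative decomposition, not faster.

-- ===== PORT A =====
-- inner 'for j, val in enumerate(row): if val == 2: pos = (i,j); break'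
def findInRowA : List Int → Int → Option Int
  | [], _ => none
  | v :: rest, j => if v == 2 then some j else findInRowA rest (j + 1)

-- outer 'for i, row in enumerate(grid): …; if pos: break'  (pos is a nonempty tuple, always truthy)
def findPosA : List (List Int) → Int → Option (Int × Int)
  | [], _ => none
  | row :: rest, i =>
    match findInRowA row 0 with
    | some j => some (i, j)
    | none => findPosA rest (i + 1)

def transform (grid : List (List Int)) : List (List Int) :=
  match findPosA grid 0 with
  | none => grid.map (fun row => row.map (fun _ => (6 : Int)))
  | some (i0, j0) =>
    let startRow := PySem.Int.floordiv i0 2 * 2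
    let startCol := PySem.Int.floordiv j0 2 * 2
    let out := grid.map (fun row => row.map (fun _ => (6 : Int)))
    let rows : Int := grid.length
    -- grid[0]: grid is nonempty here (a 2 was found), so pyGetD with default [] is exact
    let cols : Int := (PySem.List.pyGetD grid 0 []).length
    (PySem.List.pyRange startRow (min (startRow + 2) rows) 1).foldl
      (fun o i =>
        (PySem.List.pyRange startCol (min (startCol + 2) cols) 1).foldl
          (fun o' j => PySem.List.pySetD o' i (PySem.List.pySetD (PySem.List.pyGetD o' i []) j 2)) o)
      out

-- ===== PORT B =====
-- next((i for i, row in enumerate(grid) if 2 in row), None); B keeps the found row with its index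
def transform_alt (grid : List (List Int)) : List (List Int) :=
  match (PySem.List.enumerate grid).find? (fun p => p.2.contains (2 : Int)) with
  | none => grid.map (fun row => List.replicate row.length (6 : Int))
  | some (r, rowR) =>
    -- grid[r].index(2): rowR contains a 2 here so .index cannot raise; getD 0 is exact
    let c : Int := (((PySem.List.index? rowR (2 : Int)).getD 0 : Nat) : Int)
    let sr : Int := r - PySem.Int.mod r 2
    let sc : Int := c - PySem.Int.mod c 2
    -- len(grid[0]): grid is nonempty here, so pyGetD with default [] is exact
    let hc : Int := min (sc + 2) ((PySem.List.pyGetD grid 0 []).length : Int)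
    (PySem.List.slice grid none (some sr)).map (fun row => List.replicate row.length (6 : Int))
      ++ (PySem.List.slice grid (some sr) (some (sr + 2))).map (fun row =>
           List.replicate sc.toNat (6 : Int) ++ List.replicate (hc - sc).toNat (2 : Int)
             ++ List.replicate ((row.length : Int) - hc).toNat (6 : Int))
      ++ (PySem.List.slice grid (some (sr + 2)) none).map (fun row => List.replicate row.length (6 : Int))

-- ===== PRECONDITION & SPEC =====
-- Pre_ admits every grid without a 2; when a 2 exists it excludes exactly the ragged grids on
-- which A's block write, sized by len(grid[0]), would raise IndexError on a shorter block row
-- or is silently truncated by len(grid[0]) (A then returns an unmarked or partially-sized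
-- all-6 grid, an artefact of sizing the write by grid[0] on a ragged grid).
def Pre_transform (grid : List (List Int)) : Prop :=
  grid.findIdx (fun row => row.contains (2 : Int)) < grid.length →
    ((PySem.List.index? (grid.getD (grid.findIdx (fun row => row.contains (2 : Int))) []) (2 : Int)).getD 0) / 2 * 2
        ≤ (grid.headD []).length ∧
      ∀ k ∈ List.range grid.length,
        grid.findIdx (fun row => row.contains (2 : Int)) / 2 * 2 ≤ k →
        k < grid.findIdx (fun row => row.contains (2 : Int)) / 2 * 2 + 2 →
        min (((PySem.List.index? (grid.getD (grid.findIdx (fun row => row.contains (2 : Int))) []) (2 : Int)).getD 0) / 2 * 2 + 2)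
            (grid.headD []).length ≤ (grid.getD k []).length
instance (grid : List (List Int)) : Decidable (Pre_transform grid) := by unfold Pre_transform; infer_instance

def pvWitness_transform : List (List Int) := [[6, 6], [6, 2]]

def Spec_transform (grid : List (List Int)) (out : List (List Int)) : Prop := out = transform_alt grid
instance (grid : List (List Int)) (out : List (List Int)) : Decidable (Spec_transform grid out) := by unfold Spec_transform; infer_instance

-- ===== CLAIM (what is proved, stated in full; the proofs are below) =====
def Claim_equal_transform : Prop := ∀ (grid : List (List Int)), Dom_transform grid → Pre_transform grid → Spec_transform grid (transform grid)

-- ===== LEMMAS AND PROOFS =====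

-- elementwise characterisation of a fold writing g(old value) at every index of [a, b)
theorem pv_foldl_set_getElem? {α : Type} (g : α → α) (d : α) (b : Int) :
    ∀ (n : Nat) (a : Int), (b - a).toNat ≤ n → 0 ≤ a → ∀ (o : List α) (k : Nat),
      ((PySem.List.pyRange a b).foldl (fun o r => PySem.List.pySetD o r (g (PySem.List.pyGetD o r d))) o)[k]? =
        if a ≤ (k : Int) ∧ (k : Int) < b then (o[k]?).map g else o[k]? := by
  intro n
  induction n with
  | zero =>
    intro a hn ha o k
    have hb : b ≤ a := by omega
    rw [PySem.List.pyRange_one_eq_nil hb]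
    simp only [List.foldl_nil]
    rw [if_neg (by omega)]
  | succ n ih =>
    intro a hn ha o k
    by_cases hab : b ≤ a
    · rw [PySem.List.pyRange_one_eq_nil hab]
      simp only [List.foldl_nil]
      rw [if_neg (by omega)]
    · have hab' : a < b := by omega
      rw [PySem.List.pyRange_one_cons hab']
      simp only [List.foldl_cons]
      rw [ih (a + 1) (by omega) (by omega)]
      rw [PySem.List.pySetD_of_nonneg _ _ ha, PySem.List.pyGetD_of_nonneg _ _ ha]
      by_cases hk : (k : Int) = a
      · have hka : a.toNat = k := by omega
        rw [hka]
        rw [if_neg (by omega), if_pos (by omega)]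
        by_cases hlen : k < o.length
        · rw [List.getElem?_set_self hlen, List.getElem?_eq_getElem hlen]
          rw [List.getD_eq_getElem?_getD, List.getElem?_eq_getElem hlen]
          rfl
        · have h1 : o[k]? = none := by rw [List.getElem?_eq_none_iff]; omega
          have h2 : (o.set k (g (o.getD k d)))[k]? = none := by
            rw [List.getElem?_eq_none_iff]; simp; omega
          rw [h1, h2]; rfl
      · have hne : k ≠ a.toNat := by omega
        rw [List.getElem?_set_ne (by omega)]
        by_cases hc : a + 1 ≤ (k : Int) ∧ (k : Int) < b
        · rw [if_pos hc, if_pos (by omega)]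
        · rw [if_neg hc, if_neg (by omega)]

-- lifting the inner column loop out of the grid state
theorem pv_foldl_lift (n : Nat) (f : List Int → Int → List Int) :
    ∀ (l : List Int) (o : List (List Int)),
      l.foldl (fun o' j => o'.set n (f (o'.getD n []) j)) o = o.set n (l.foldl f (o.getD n [])) := by
  intro l
  induction l with
  | nil =>
    intro o
    by_cases h : n < o.length
    · simp only [List.foldl_nil]
      rw [List.getD_eq_getElem?_getD, List.getElem?_eq_getElem h]
      simp [List.set_getElem_self]
    · simp only [List.foldl_nil]
      rw [List.set_eq_of_length_le (by omega)]
  | cons j l ih =>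
    intro o
    simp only [List.foldl_cons]
    rw [ih]
    by_cases h : n < o.length
    · rw [List.set_set]
      congr 2
      rw [List.getD_eq_getElem?_getD, List.getElem?_set_self h]
      rfl
    · have ho : o.set n (f (o.getD n []) j) = o := List.set_eq_of_length_le (by omega)
      rw [ho, List.set_eq_of_length_le (by omega), List.set_eq_of_length_le (by omega)]

-- A's inner row scan equals .index of the first 2
theorem pv_findInRow_eq (row : List Int) :
    ∀ (s : Int), findInRowA row s =
      (PySem.List.index? row (2 : Int)).map (fun n : Nat => s + (n : Int)) := by
  induction row with
  | nil => intro s; simp [findInRowA, PySem.List.index?]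
  | cons v rest ih =>
    intro s
    by_cases h : v = 2
    · subst h
      rw [PySem.List.index?_cons_self]
      simp [findInRowA]
    · rw [PySem.List.index?_cons_of_ne rest h]
      have hv : (v == (2 : Int)) = false := by simp [h]
      simp only [findInRowA, hv, Bool.false_eq_true, if_false]
      rw [ih (s + 1)]
      cases PySem.List.index? rest (2 : Int) with
      | none => rfl
      | some n => simp only [Option.map_some]; congr 1; push_cast; ring

-- A's early-exit double loop equals B's membership scan plus .index
theorem pv_findPos_char (grid : List (List Int)) :
    ∀ (s : Int), findPosA grid s =
      ((PySem.List.enumerate grid s).find? (fun p => p.2.contains (2 : Int))).map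
        (fun p => (p.1, (((PySem.List.index? p.2 (2 : Int)).getD 0 : Nat) : Int))) := by
  induction grid with
  | nil => intro s; simp [findPosA, PySem.List.enumerate]
  | cons row rest ih =>
    intro s
    simp only [findPosA, PySem.List.enumerate_cons, List.find?_cons]
    rw [pv_findInRow_eq row 0]
    by_cases hmem : (2 : Int) ∈ row
    · obtain ⟨n, hn⟩ := Option.isSome_iff_exists.mp ((PySem.List.index?_isSome_iff _ _).mpr hmem)
      have hb : row.contains (2 : Int) = true := by simpa using hmem
      rw [hb, hn]
      rw [PySem.List.index?_eq_idxOf?] at hn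
      simp [hn]
    · have hnone : PySem.List.index? row (2 : Int) = none :=
        (PySem.List.index?_eq_none_iff _ _).mpr hmem
      have hb : row.contains (2 : Int) = false := by simpa using hmem
      rw [hb, hnone]
      simpa using ih (s + 1)

-- find? over enumerate, characterised by findIdx
theorem pv_find_char (grid : List (List Int)) :
    ∀ (s : Int) (pr : Int × List Int),
      (PySem.List.enumerate grid s).find? (fun p => p.2.contains (2 : Int)) = some pr →
      grid.findIdx (fun row => row.contains (2 : Int)) < grid.length ∧
        pr.1 = s + (grid.findIdx (fun row => row.contains (2 : Int)) : Int) ∧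
        pr.2 = grid.getD (grid.findIdx (fun row => row.contains (2 : Int))) [] := by
  induction grid with
  | nil => intro s pr h; simp [PySem.List.enumerate] at h
  | cons row rest ih =>
    intro s pr h
    rw [PySem.List.enumerate_cons, List.find?_cons] at h
    by_cases hc : row.contains (2 : Int) = true
    · rw [hc] at h
      simp only [Option.some.injEq] at h
      rw [List.findIdx_cons, hc]
      subst h
      simp
    · have hc' : row.contains (2 : Int) = false := by simpa using hc
      rw [hc'] at h
      simp only [] at h
      obtain ⟨h1, h2, h3⟩ := ih (s + 1) pr h
      rw [List.findIdx_cons, hc']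
      refine ⟨by simpa using Nat.succ_lt_succ h1, ?_, by simpa using h3⟩
      simp only [cond_false]
      rw [h2]; push_cast; ring

-- the column-marking pass applied to one row
def pvG (sc cols : Int) (ro : List Int) : List Int :=
  (PySem.List.pyRange sc (min (sc + 2) cols)).foldl (fun ro j => PySem.List.pySetD ro j 2) ro

theorem pv_row_getElem? (b a : Int) (ha : 0 ≤ a) (o : List Int) (k : Nat) :
    ((PySem.List.pyRange a b).foldl (fun ro j => PySem.List.pySetD ro j 2) o)[k]? =
      if a ≤ (k : Int) ∧ (k : Int) < b then (o[k]?).map (fun _ => (2 : Int)) else o[k]? :=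
  pv_foldl_set_getElem? (fun _ => (2 : Int)) 0 b (b - a).toNat a le_rfl ha o k

-- the marked row, in B's three-segment form
theorem pvRow_eq (sc cols L : Nat) (hsc : sc ≤ cols) (hlen : min (sc + 2) cols ≤ L) :
    pvG (sc : Int) (cols : Int) (List.replicate L (6 : Int)) =
      List.replicate sc (6 : Int) ++ List.replicate (min (sc + 2) cols - sc) (2 : Int)
        ++ List.replicate (L - min (sc + 2) cols) (6 : Int) := by
  set hcn := min (sc + 2) cols with hhcn
  have hschc : sc ≤ hcn := by omega
  have hmin : min ((sc : Int) + 2) (cols : Int) = (hcn : Int) := by rw [hhcn]; omega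
  have h1len : (List.replicate sc (6 : Int) ++ List.replicate (hcn - sc) (2 : Int)).length = hcn := by
    simp; omega
  apply List.ext_getElem?
  intro m
  unfold pvG
  rw [pv_row_getElem? (min ((sc : Int) + 2) (cols : Int)) (sc : Int) (by positivity) _ m, hmin]
  rcases Nat.lt_or_ge m sc with h | h
  · rw [List.getElem?_append_left (by rw [h1len]; omega),
        List.getElem?_append_left (by simp; omega)]
    simp only [List.getElem?_replicate]
    rw [if_neg (by omega), if_pos h, if_pos (by omega)]
  · rcases Nat.lt_or_ge m hcn with h2 | h2
    · rw [List.getElem?_append_left (by rw [h1len]; omega),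
          List.getElem?_append_right (by simp; omega)]
      simp only [List.length_replicate, List.getElem?_replicate]
      rw [if_pos (by constructor <;> omega), if_pos (by omega), if_pos (by omega)]
      simp
    · rw [List.getElem?_append_right (by rw [h1len]; omega), h1len]
      simp only [List.getElem?_replicate]
      rcases Nat.lt_or_ge m L with h3 | h3
      · rw [if_neg (by omega), if_pos h3, if_pos (by omega)]
      · rw [if_neg (by omega), if_neg (by omega), if_neg (by omega)]

-- elementwise view of B's three-segment assembly
theorem pvB_getElem? {f g : List Int → List Int} (grid : List (List Int)) (srN k : Nat) :
    ((grid.take srN).map f ++ ((grid.drop srN).take 2).map g ++ (grid.drop (srN + 2)).map f)[k]? =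
      if srN ≤ k ∧ k < srN + 2 then (grid[k]?).map g else (grid[k]?).map f := by
  rcases Nat.lt_or_ge k grid.length with hkL | hkL
  · have hgk : grid[k]? = some (grid[k]'hkL) := List.getElem?_eq_getElem hkL
    rcases Nat.lt_or_ge k srN with h1 | h1
    · rw [List.getElem?_append_left (by simp; omega),
          List.getElem?_append_left (by simp; omega),
          if_neg (by omega), hgk]
      simp only [List.getElem?_map, List.getElem?_take, if_pos h1, hgk, Option.map_some]
    · rcases Nat.lt_or_ge k (srN + 2) with h2 | h2
      · rw [List.getElem?_append_left (by simp; omega),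
          List.getElem?_append_right (by simp; omega),
          if_pos ⟨h1, h2⟩, hgk]
        simp only [List.length_map, List.length_take, List.getElem?_map, List.getElem?_take,
          List.getElem?_drop]
        have hmin : min srN grid.length = srN := by omega
        rw [hmin, if_pos (by omega)]
        have hix : srN + (k - srN) = k := by omega
        rw [hix, hgk]
      · rw [List.getElem?_append_right (by simp; omega), if_neg (by omega), hgk]
        simp only [List.length_append, List.length_map, List.length_take, List.length_drop,
          List.getElem?_map, List.getElem?_drop]
        have hix : srN + 2 + (k - (min srN grid.length + min 2 (grid.length - srN))) = k := by
          omega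
        rw [hix, hgk]
  · rw [List.getElem?_eq_none (by simp; omega), List.getElem?_eq_none hkL]
    split_ifs <;> rfl

theorem pv_main (grid : List (List Int)) (hpre : Pre_transform grid) :
    transform grid = transform_alt grid := by
  unfold transform transform_alt
  rw [pv_findPos_char grid 0]
  cases hf : (PySem.List.enumerate grid).find? (fun p => p.2.contains (2 : Int)) with
  | none =>
    simp only [Option.map_none]
    exact List.map_congr_left (fun row _ => by simp [List.map_const'])
  | some pr =>
    obtain ⟨r0, rowR⟩ := pr
    obtain ⟨hrlen, hr0, hrow⟩ := pv_find_char grid 0 (r0, rowR) hf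
    simp only at hr0 hrow
    subst hr0
    subst hrow
    have hcont : (grid.getD (grid.findIdx (fun row => row.contains (2 : Int))) []).contains (2 : Int) = true := by
      simpa using List.find?_some hf
    have hmem : (2 : Int) ∈ grid.getD (grid.findIdx (fun row => row.contains (2 : Int))) [] := by
      simpa using hcont
    obtain ⟨cD, hcD⟩ := Option.isSome_iff_exists.mp ((PySem.List.index?_isSome_iff _ _).mpr hmem)
    simp only [Option.map_some]
    rw [hcD]
    simp only [Option.getD_some, zero_add]
    unfold Pre_transform at hpre
    obtain ⟨hscc, hblk⟩ := hpre hrlen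
    rw [hcD] at hscc hblk
    simp only [Option.getD_some] at hscc hblk
    have hfd : ∀ n : Nat, PySem.Int.floordiv (n : Int) 2 * 2 = ((n / 2 * 2 : Nat) : Int) := by
      intro n; have h := PySem.Int.floordiv_natCast n 2; push_cast at h ⊢; omega
    have hmd : ∀ n : Nat, (n : Int) - PySem.Int.mod (n : Int) 2 = ((n / 2 * 2 : Nat) : Int) := by
      intro n; have h := PySem.Int.mod_natCast n 2; push_cast at h ⊢; omega
    have hg0 : PySem.List.pyGetD grid 0 [] = grid.headD [] := by
      cases grid with
      | nil => simp at hrlen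
      | cons a l => rw [PySem.List.pyGetD_of_nonneg _ _ (by norm_num)]; simp
    rw [hfd, hfd, hmd, hmd, hg0]
    set rD := List.findIdx (fun row => row.contains (2 : Int)) grid with hrDdef
    set L := grid.length with hLdef
    set srN := rD / 2 * 2 with hsrNdef
    set scN := cD / 2 * 2 with hscNdef
    set colsN := (grid.headD []).length with hcolsNdef
    have htn1 : ((min ((scN : Int) + 2) (colsN : Int)) - (scN : Int)).toNat = min (scN + 2) colsN - scN := by
      omega
    have h2c : ((srN : Int) + 2) = ((srN + 2 : Nat) : Int) := by push_cast; ring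
    rw [htn1, Int.toNat_natCast, PySem.List.slice_to_natCast, h2c, PySem.List.slice_natCast,
        PySem.List.slice_from_natCast]
    have h22 : srN + 2 - srN = 2 := by omega
    rw [h22, ← h2c]
    have hsr0 : (0 : Int) ≤ (srN : Int) := by positivity
    have hcong : ∀ (o : List (List Int)), ∀ i ∈ PySem.List.pyRange (srN : Int) (min ((srN : Int) + 2) (L : Int)),
        (PySem.List.pyRange (scN : Int) (min ((scN : Int) + 2) (colsN : Int))).foldl
            (fun o' j => PySem.List.pySetD o' i (PySem.List.pySetD (PySem.List.pyGetD o' i []) j 2)) o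
          = PySem.List.pySetD o i (pvG (scN : Int) (colsN : Int) (PySem.List.pyGetD o i [])) := by
      intro o i hi
      have hi0' : 0 ≤ i := by
        have := (PySem.List.mem_pyRange_one.mp hi).1
        omega
      simp only [PySem.List.pySetD_of_nonneg (i := i), PySem.List.pyGetD_of_nonneg (i := i), hi0']
      exact pv_foldl_lift i.toNat (fun ro j => PySem.List.pySetD ro j 2) _ o
    rw [PySem.List.foldl_congr_mem _ _
          (fun o i => PySem.List.pySetD o i (pvG (scN : Int) (colsN : Int) (PySem.List.pyGetD o i []))) _
          (fun acc x hx => hcong acc x hx)]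
    apply List.ext_getElem?
    intro k
    rw [pv_foldl_set_getElem? (pvG (scN : Int) (colsN : Int)) [] (min ((srN : Int) + 2) (L : Int))
          ((min ((srN : Int) + 2) (L : Int) - srN).toNat) (srN : Int) le_rfl hsr0 _ k]
    rw [pvB_getElem? grid srN k]
    simp only [List.getElem?_map]
    rcases Nat.lt_or_ge k L with hkL | hkL
    · have hgk : grid[k]? = some (grid[k]'hkL) := List.getElem?_eq_getElem hkL
      by_cases hb : srN ≤ k ∧ k < srN + 2
      · rw [if_pos (by omega), if_pos hb, hgk]
        simp only [Option.map_some]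
        congr 1
        have hlenk : min (scN + 2) colsN ≤ (grid[k]'hkL).length := by
          have := hblk k (List.mem_range.mpr hkL) hb.1 hb.2
          rwa [List.getD_eq_getElem?_getD, List.getElem?_eq_getElem hkL] at this
        rw [List.map_const', pvRow_eq scN colsN _ hscc hlenk]
        have h3 : (((grid[k]'hkL).length : Int) - min ((scN : Int) + 2) (colsN : Int)).toNat
            = (grid[k]'hkL).length - min (scN + 2) colsN := by omega
        rw [h3]
      · rw [if_neg (by omega), if_neg hb, hgk]
        simp [List.map_const']
    · rw [List.getElem?_eq_none hkL]
      simp only [Option.map_none]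
      split_ifs <;> rfl
-- ===== VERDICT (by name: the statement is the Claim_ definition above) =====
theorem transform_spec : Claim_equal_transform := by
  intro grid _ hpre
  unfold Spec_transform
  exact pv_main grid hpre
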